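-- pv_equiv track=rewrite | github.com/dyingroomdev/splguard | src/splguard/utils/detection.py | domain_in_allowlist
-- ===== SOURCE A (Python) =====
-- def domain_in_allowlist(domain: str, allowlist: set[str]) -> bool:
--     domain = domain.lower()
--     if domain in allowlist:
--         return True
--     labels = domain.split(".")
--     for i in range(1, len(labels)):
--         candidate = ".".join(labels[i:])
--         if candidate in allowlist:
--             return True
--     for allowed in allowlist:
--         if allowed.startswith("*.") and domain.endswith(allowed[1:]):
--             return True
--     return False
-- ===== SOURCE B (Python) =====
-- def domain_in_allowlist(domain: str, allowlist: set[str]) -> bool: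
--     domain = domain.lower()
--     for allowed in allowlist:
--         if (domain == allowed
--                 or (allowed.startswith("*.") and domain.endswith(allowed[1:]))
--                 or domain.endswith("." + allowed)):
--             return True
--     return False
-- ===== Notes on version B (the rewrite author's own statement) =====
-- stated objective: simpler
-- what changed: Replaces A's three phases (set membership of the whole domain, generating every parent suffix by split('.') plus '.'.join plus membership, and a separate wildcard scan) with a single scan of the allowlist that tests each entry with domain == allowed, a '*.'-wildcard suffix test, or domain.endswith('.' + allowed).
import Mathlib
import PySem

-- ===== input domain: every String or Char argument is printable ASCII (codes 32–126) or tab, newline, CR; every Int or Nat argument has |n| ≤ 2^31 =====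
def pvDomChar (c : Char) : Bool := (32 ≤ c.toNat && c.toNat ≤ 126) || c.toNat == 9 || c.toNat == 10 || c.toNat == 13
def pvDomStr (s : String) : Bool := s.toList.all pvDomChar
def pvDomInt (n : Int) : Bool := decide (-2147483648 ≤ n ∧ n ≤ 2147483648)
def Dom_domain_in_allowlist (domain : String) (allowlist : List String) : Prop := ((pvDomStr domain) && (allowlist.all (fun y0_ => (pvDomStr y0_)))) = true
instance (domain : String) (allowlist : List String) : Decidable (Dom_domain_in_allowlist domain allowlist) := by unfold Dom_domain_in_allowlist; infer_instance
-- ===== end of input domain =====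

-- B replaces A's three phases (exact set membership, generating every parent suffix
-- via split/join, separate wildcard scan) with a single scan of the allowlist using
-- string suffix tests; objective: simpler.

-- ===== PORT A =====
def domain_in_allowlist (domain : String) (allowlist : List String) : Bool :=
  let d := PySem.Str.lower domain
  if allowlist.contains d then true
  else
    let labels := (PySem.Str.split? d ".").getD []
    if (PySem.List.pyRange 1 (labels.length : Int) 1).any
        (fun i => allowlist.contains (PySem.Str.join "." (PySem.List.slice labels (some i) none))) then
      true
    else
      allowlist.any (fun allowed =>
        PySem.Str.startswith allowed "*." &&
          PySem.Str.endswith d (PySem.Str.slice allowed (some 1) none))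

-- ===== PORT B =====
def domain_in_allowlist_alt (domain : String) (allowlist : List String) : Bool :=
  let d := PySem.Str.lower domain
  allowlist.any (fun allowed =>
    d == allowed
    || (PySem.Str.startswith allowed "*." &&
          PySem.Str.endswith d (PySem.Str.slice allowed (some 1) none))
    || PySem.Str.endswith d ("." ++ allowed))

-- ===== PRECONDITION & SPEC =====
def Spec_domain_in_allowlist (domain : String) (allowlist : List String) (out : Bool) : Prop := out = domain_in_allowlist_alt domain allowlist
instance (domain : String) (allowlist : List String) (out : Bool) : Decidable (Spec_domain_in_allowlist domain allowlist out) := by unfold Spec_domain_in_allowlist; infer_instance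

-- ===== CLAIM (what is proved, stated in full; the proofs are below) =====
def Claim_equal_domain_in_allowlist : Prop := ∀ (domain : String) (allowlist : List String), Dom_domain_in_allowlist domain allowlist → Spec_domain_in_allowlist domain allowlist (domain_in_allowlist domain allowlist)

-- ===== LEMMAS AND PROOFS =====

-- clean structural recursion computing s.split('.') on the char-list side
def pvSp : List Char → List (List Char)
  | [] => [[]]
  | c :: rest =>
    if c = '.' then [] :: pvSp rest
    else
      match pvSp rest with
      | [] => [[c]]
      | h :: t => (c :: h) :: t

theorem pvSp_ne_nil (l : List Char) : pvSp l ≠ [] := by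
  cases l with
  | nil => simp [pvSp]
  | cons c rest =>
    simp only [pvSp]
    split
    · simp
    · cases h : pvSp rest <;> simp

theorem pvGo_eq (fuel : Nat) (l cur : List Char) (acc : List (List Char))
    (h : l.length < fuel) :
    PySem.Chars.splitOn.go ['.'] fuel l cur acc
      = acc.reverse ++ (pvSp l).modifyHead (cur.reverse ++ ·) := by
  induction fuel generalizing l cur acc with
  | zero => omega
  | succ fuel ih =>
    rw [PySem.Chars.splitOn.go.eq_def]
    cases l with
    | nil => simp [pvSp]
    | cons c rest =>
      by_cases hc : c = '.'
      · subst hc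
        simp only [List.isPrefixOf, beq_self_eq_true, Bool.true_and, if_true,
          List.length_nil, Nat.zero_add, List.length_cons, List.drop_succ_cons, List.drop_zero]
        rw [ih rest [] (cur.reverse :: acc) (by simpa using Nat.lt_of_succ_lt_succ h)]
        simp [pvSp, List.modifyHead]
        cases hsp : pvSp rest with
        | nil => exact absurd hsp (pvSp_ne_nil rest)
        | cons a b => simp
      · have hpre : (['.'].isPrefixOf (c :: rest)) = false := by
          simp only [List.isPrefixOf, Bool.and_true, beq_eq_false_iff_ne, ne_eq]
          exact fun h => hc h.symm
        simp only [hpre, Bool.false_eq_true, if_false]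
        rw [ih rest (c :: cur) acc (by simpa using Nat.lt_of_succ_lt_succ h)]
        simp only [pvSp, hc, if_false]
        cases hsp : pvSp rest with
        | nil => exact absurd hsp (pvSp_ne_nil rest)
        | cons a b => simp [List.modifyHead]

theorem pvSplitOn_dot (l : List Char) : PySem.Chars.splitOn l ['.'] = pvSp l := by
  unfold PySem.Chars.splitOn
  rw [pvGo_eq (l.length + 1) l [] [] (by omega)]
  cases hsp : pvSp l with
  | nil => exact absurd hsp (pvSp_ne_nil l)
  | cons a b => simp [List.modifyHead]

theorem pvJoin_pvSp (l : List Char) : PySem.Chars.join ['.'] (pvSp l) = l := by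
  induction l with
  | nil => simp [pvSp, PySem.Chars.join_singleton]
  | cons c rest ih =>
    by_cases hc : c = '.'
    · subst hc
      simp only [pvSp, if_true]
      cases hsp : pvSp rest with
      | nil => exact absurd hsp (pvSp_ne_nil rest)
      | cons a b =>
        rw [PySem.Chars.join_cons_cons]
        rw [hsp] at ih
        simp [ih]
    · simp only [pvSp, hc, if_false]
      cases hsp : pvSp rest with
      | nil => exact absurd hsp (pvSp_ne_nil rest)
      | cons a b =>
        rw [hsp] at ih
        cases b with
        | nil =>
          simp [PySem.Chars.join_singleton] at ih ⊢
          simp [ih]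
        | cons b0 bs =>
          rw [PySem.Chars.join_cons_cons] at ih ⊢
          simp [ih]

-- parent suffixes of l = dot-suffixes of l
theorem pvSp_length_pos (l : List Char) : 0 < (pvSp l).length := by
  cases h : pvSp l with
  | nil => exact absurd h (pvSp_ne_nil l)
  | cons a b => simp

theorem pvKey (l : List Char) (t : List Char) :
    (∃ i : Nat, 1 ≤ i ∧ i < (pvSp l).length ∧
        PySem.Chars.join ['.'] ((pvSp l).drop i) = t) ↔ ('.' :: t) <:+ l := by
  induction l generalizing t with
  | nil =>
    constructor
    · rintro ⟨i, h1, h2, _⟩; simp [pvSp] at h2; omega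
    · intro h; exact absurd (List.eq_nil_of_suffix_nil h) (by simp)
  | cons c rest ih =>
    rw [List.suffix_cons_iff]
    by_cases hc : c = '.'
    · subst hc
      have hlen : pvSp ('.' :: rest) = [] :: pvSp rest := by simp [pvSp]
      constructor
      · rintro ⟨i, h1, h2, h3⟩
        rw [hlen] at h2 h3
        rcases Nat.lt_or_ge i 2 with hi | hi
        · have : i = 1 := by omega
          subst this
          simp only [List.drop_one, List.tail_cons] at h3
          rw [pvJoin_pvSp] at h3
          left; rw [h3]
        · right
          rw [← ih t]
          have hdrop : (([] : List Char) :: pvSp rest).drop i = (pvSp rest).drop (i - 1) := by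
            cases i with
            | zero => omega
            | succ j => simp
          rw [hdrop] at h3
          exact ⟨i - 1, by omega, by simp at h2; omega, h3⟩
      · rintro (h | h)
        · have ht : rest = t := by injection h with _ h2; exact h2.symm
          refine ⟨1, le_refl 1, ?_, ?_⟩
          · rw [hlen]; simpa using pvSp_length_pos rest
          · rw [hlen]
            simp only [List.drop_one, List.tail_cons]
            rw [pvJoin_pvSp]; exact ht
        · rcases (ih t).mpr h with ⟨j, h1, h2, h3⟩
          refine ⟨j + 1, by omega, ?_, ?_⟩
          · rw [hlen]; simpa using h2
          · rw [hlen]; simpa using h3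
    · have hne : ¬ ('.' :: t) = c :: rest := by
        intro h; injection h with h1 _; exact hc h1.symm
      rcases hsp : pvSp rest with _ | ⟨a, b⟩
      · exact absurd hsp (pvSp_ne_nil rest)
      · have hlen : pvSp (c :: rest) = (c :: a) :: b := by simp [pvSp, hc, hsp]
        have hdrop : ∀ i : Nat, 1 ≤ i → ((c :: a) :: b).drop i = (a :: b).drop i := by
          intro i hi
          cases i with
          | zero => omega
          | succ j => simp
        constructor
        · rintro ⟨i, h1, h2, h3⟩
          rw [hlen] at h2 h3
          rw [hdrop i h1] at h3
          right
          rw [← ih t]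
          exact ⟨i, h1, by rw [hsp]; simpa using h2, by rw [hsp]; exact h3⟩
        · rintro (h | h)
          · exact absurd h hne
          · rcases (ih t).mpr h with ⟨j, h1, h2, h3⟩
            rw [hsp] at h2 h3
            refine ⟨j, h1, ?_, ?_⟩
            · rw [hlen]; simpa using h2
            · rw [hlen, hdrop j h1]; exact h3

theorem pvJoin_map_ofList (xs : List (List Char)) :
    (PySem.Str.join "." (xs.map String.ofList)).toList = PySem.Chars.join ['.'] xs := by
  rw [PySem.Str.toList_join]
  have hdot : (".".toList) = ['.'] := rfl
  rw [hdot]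
  congr 1
  simp [List.map_map, Function.comp_def, String.toList_ofList]

theorem pvLabels_eq (d : String) :
    ((PySem.Str.split? d ".").getD []) = (pvSp d.toList).map String.ofList := by
  unfold PySem.Str.split?
  have hdot : (".".toList) = ['.'] := rfl
  rw [hdot]
  unfold PySem.Chars.split?
  simp [pvSplitOn_dot]

theorem pvParent_iff (d a : String) :
    (∃ i : Int, 1 ≤ i ∧ i < (((pvSp d.toList).map String.ofList).length : Int) ∧
        PySem.Str.join "." (PySem.List.slice ((pvSp d.toList).map String.ofList) (some i) none) = a)
      ↔ ('.' :: a.toList) <:+ d.toList := by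
  rw [← pvKey d.toList a.toList]
  constructor
  · rintro ⟨i, h1, h2, h3⟩
    have h0 : (0 : Int) ≤ i := by omega
    rw [PySem.List.slice_from _ h0] at h3
    refine ⟨i.toNat, by omega, ?_, ?_⟩
    · simp only [List.length_map] at h2; omega
    · rw [← String.toList_inj] at h3
      rw [← List.map_drop, pvJoin_map_ofList] at h3
      exact h3
  · rintro ⟨j, h1, h2, h3⟩
    refine ⟨(j : Int), by omega, by simp; omega, ?_⟩
    rw [PySem.List.slice_from _ (by omega)]
    rw [← String.toList_inj]
    rw [Int.toNat_natCast, ← List.map_drop, pvJoin_map_ofList]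
    exact h3

theorem pvA_iff (domain : String) (al : List String) :
    domain_in_allowlist domain al = true ↔
      ∃ a ∈ al, (PySem.Str.lower domain = a
        ∨ (PySem.Str.startswith a "*." &&
            PySem.Str.endswith (PySem.Str.lower domain) (PySem.Str.slice a (some 1) none)) = true
        ∨ ('.' :: a.toList) <:+ (PySem.Str.lower domain).toList) := by
  have hrfl : domain_in_allowlist domain al =
      (if al.contains (PySem.Str.lower domain) then true
       else if (PySem.List.pyRange 1 ((((PySem.Str.split? (PySem.Str.lower domain) ".").getD []).length : Int)) 1).any
            (fun i => al.contains (PySem.Str.join "."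
              (PySem.List.slice ((PySem.Str.split? (PySem.Str.lower domain) ".").getD []) (some i) none)))
       then true
       else al.any (fun allowed =>
          PySem.Str.startswith allowed "*." &&
            PySem.Str.endswith (PySem.Str.lower domain) (PySem.Str.slice allowed (some 1) none))) := rfl
  rw [hrfl, pvLabels_eq]
  split_ifs with h1 h2
  · simp only [true_iff]
    exact ⟨_, List.contains_iff_mem.mp h1, Or.inl rfl⟩
  · simp only [true_iff]
    rw [List.any_eq_true] at h2
    obtain ⟨i, hmem, hcont⟩ := h2
    rw [PySem.List.mem_pyRange_one] at hmem
    rw [List.contains_iff_mem] at hcont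
    refine ⟨_, hcont, Or.inr (Or.inr ?_)⟩
    exact (pvParent_iff (PySem.Str.lower domain) _).mp ⟨i, hmem.1, hmem.2, rfl⟩
  · rw [List.any_eq_true]
    constructor
    · rintro ⟨a, ha, hw⟩
      exact ⟨a, ha, Or.inr (Or.inl hw)⟩
    · rintro ⟨a, ha, (hd | hw | hs)⟩
      · exact absurd (List.contains_iff_mem.mpr (by rw [hd]; exact ha)) h1
      · exact ⟨a, ha, hw⟩
      · exfalso
        apply h2
        rw [List.any_eq_true]
        obtain ⟨i, hi1, hi2, hj⟩ := (pvParent_iff (PySem.Str.lower domain) a).mpr hs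
        exact ⟨i, PySem.List.mem_pyRange_one.mpr ⟨hi1, hi2⟩,
          by rw [hj]; exact List.contains_iff_mem.mpr ha⟩

theorem pvB_iff (domain : String) (al : List String) :
    domain_in_allowlist_alt domain al = true ↔
      ∃ a ∈ al, (PySem.Str.lower domain = a
        ∨ (PySem.Str.startswith a "*." &&
            PySem.Str.endswith (PySem.Str.lower domain) (PySem.Str.slice a (some 1) none)) = true
        ∨ ('.' :: a.toList) <:+ (PySem.Str.lower domain).toList) := by
  unfold domain_in_allowlist_alt
  rw [List.any_eq_true]
  apply exists_congr; intro a
  apply and_congr_right; intro _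
  simp only [Bool.or_eq_true, beq_iff_eq, or_assoc]
  apply or_congr Iff.rfl
  apply or_congr Iff.rfl
  rw [PySem.Str.endswith_eq, PySem.Chars.endswith_iff, String.toList_append]
  have hdot : (".".toList) = ['.'] := rfl
  rw [hdot]
  rfl

theorem domain_in_allowlist_spec : Claim_equal_domain_in_allowlist := by
  intro domain allowlist _
  unfold Spec_domain_in_allowlist
  rw [Bool.eq_iff_iff, pvA_iff, pvB_iff]
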